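-- pv_equiv track=rewrite | github.com/Manya123-web/BigDataProject | pipeline/cleaning/data_clean.py | categorize_links
-- ===== SOURCE A (Python) =====
-- def categorize_links(links):
--     if not isinstance(links, list) or not links:
--         return None
--
--     categorized = {
--         "personal_website": [],
--         "google_scholar": [],
--         "linkedin": [],
--         "youtube": [],
--         "other": []
--     }
--
--     for link in links:
--         if "scholar.google" in link:
--             categorized["google_scholar"].append(link)
--
--         elif "linkedin.com" in link:
--             categorized["linkedin"].append(link)
--
--         elif "youtube.com" in link or "youtu.be" in link:
--             categorized["youtube"].append(link)
--
--         elif "sites.google" in link or "github.io" in link: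
--             categorized["personal_website"].append(link)
--
--         else:
--             categorized["other"].append(link)
--
--     categorized = {k: v for k, v in categorized.items() if v}
--
--     return categorized if categorized else None
-- ===== SOURCE B (Python) =====
-- def categorize_links(links):
--     if not isinstance(links, list) or not links:
--         return None
--
--     def classify(link):
--         if "scholar.google" in link:
--             return "google_scholar"
--         if "linkedin.com" in link:
--             return "linkedin"
--         if "youtube.com" in link or "youtu.be" in link:
--             return "youtube"
--         if "sites.google" in link or "github.io" in link:
--             return "personal_website"
--         return "other"
--
--     tagged = [(classify(link), link) for link in links]
--     keys = ["personal_website", "google_scholar", "linkedin", "youtube", "other"]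
--     result = {k: [l for t, l in tagged if t == k] for k in keys}
--     result = {k: v for k, v in result.items() if v}
--     return result if result else None
-- ===== Notes on version B (the rewrite author's own statement) =====
-- stated objective: idiomatic
-- what changed: Replaces the five-accumulator dict built by in-loop appends with a classify-then-group pipeline: each link is tagged with its category name once, and the dict is built per key by filtering the tagged list.
import Mathlib
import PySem

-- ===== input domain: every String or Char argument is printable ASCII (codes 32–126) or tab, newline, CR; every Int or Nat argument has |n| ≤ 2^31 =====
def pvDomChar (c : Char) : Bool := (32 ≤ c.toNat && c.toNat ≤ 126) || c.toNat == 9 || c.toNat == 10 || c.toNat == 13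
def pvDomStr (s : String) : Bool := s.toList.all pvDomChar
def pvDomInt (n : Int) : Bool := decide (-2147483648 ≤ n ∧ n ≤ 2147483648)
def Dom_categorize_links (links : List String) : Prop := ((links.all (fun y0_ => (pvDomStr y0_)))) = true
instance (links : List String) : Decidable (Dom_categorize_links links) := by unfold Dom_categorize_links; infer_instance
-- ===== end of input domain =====

-- B replaces A's in-loop appends into five accumulators with a classify-then-group pipeline (tag each link, then filter per key); same values, idiomatic restructuring.

-- ===== PORT A =====
-- A's loop state: the five category lists in dict insertion order
-- (personal_website, google_scholar, linkedin, youtube, other).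
def pvStepA (s : List String × List String × List String × List String × List String)
    (link : String) : List String × List String × List String × List String × List String :=
  let (pw, gs, li, yt, ot) := s
  if PySem.Str.isIn "scholar.google" link then (pw, gs ++ [link], li, yt, ot)
  else if PySem.Str.isIn "linkedin.com" link then (pw, gs, li ++ [link], yt, ot)
  else if PySem.Str.isIn "youtube.com" link || PySem.Str.isIn "youtu.be" link then
    (pw, gs, li, yt ++ [link], ot)
  else if PySem.Str.isIn "sites.google" link || PySem.Str.isIn "github.io" link then
    (pw ++ [link], gs, li, yt, ot)
  else (pw, gs, li, yt, ot ++ [link])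

def categorize_links (links : List String) : Option (List (String × List String)) :=
  if links = [] then none
  else
    let st := links.foldl pvStepA ([], [], [], [], [])
    let items : List (String × List String) :=
      [("personal_website", st.1), ("google_scholar", st.2.1), ("linkedin", st.2.2.1),
       ("youtube", st.2.2.2.1), ("other", st.2.2.2.2)]
    let filtered := items.filter (fun kv => !kv.2.isEmpty)
    if filtered = [] then none else some filtered

-- ===== PORT B =====
def pvClassify (link : String) : String :=
  if PySem.Str.isIn "scholar.google" link then "google_scholar"
  else if PySem.Str.isIn "linkedin.com" link then "linkedin"
  else if PySem.Str.isIn "youtube.com" link || PySem.Str.isIn "youtu.be" link then "youtube"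
  else if PySem.Str.isIn "sites.google" link || PySem.Str.isIn "github.io" link then "personal_website"
  else "other"

def categorize_links_alt (links : List String) : Option (List (String × List String)) :=
  if links = [] then none
  else
    let tagged := links.map (fun l => (pvClassify l, l))
    let keys := ["personal_website", "google_scholar", "linkedin", "youtube", "other"]
    let result := keys.map (fun k => (k, (tagged.filter (fun p => p.1 = k)).map Prod.snd))
    let filtered := result.filter (fun kv => !kv.2.isEmpty)
    if filtered = [] then none else some filtered

-- ===== PRECONDITION & SPEC =====
def Spec_categorize_links (links : List String) (out : Option (List (String × List String))) : Prop := out = categorize_links_alt links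
instance (links : List String) (out : Option (List (String × List String))) : Decidable (Spec_categorize_links links out) := by unfold Spec_categorize_links; infer_instance

-- ===== CLAIM (what is proved, stated in full; the proofs are below) =====
def Claim_equal_categorize_links : Prop := ∀ (links : List String), Dom_categorize_links links → Spec_categorize_links links (categorize_links links)

-- ===== LEMMAS AND PROOFS =====

-- B's tag-then-filter per key collapses to a plain filter of the links by classify.
lemma tagged_filter_map (links : List String) (k : String) :
    ((links.map (fun l => (pvClassify l, l))).filter (fun p => p.1 = k)).map Prod.snd
      = links.filter (fun l => pvClassify l = k) := by
  induction links with
  | nil => simp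
  | cons l ls ih =>
    simp only [List.map_cons, List.filter_cons]
    by_cases h : pvClassify l = k <;> simp [h, ih]

-- A's loop invariant: each accumulator grows by exactly the links classified to its key.
lemma loopA_eq (links : List String) (pw gs li yt ot : List String) :
    links.foldl pvStepA (pw, gs, li, yt, ot)
      = (pw ++ links.filter (fun l => pvClassify l = "personal_website"),
         gs ++ links.filter (fun l => pvClassify l = "google_scholar"),
         li ++ links.filter (fun l => pvClassify l = "linkedin"),
         yt ++ links.filter (fun l => pvClassify l = "youtube"),
         ot ++ links.filter (fun l => pvClassify l = "other")) := by
  induction links generalizing pw gs li yt ot with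
  | nil => simp
  | cons l ls ih =>
    simp only [List.foldl_cons, pvStepA]
    split_ifs with h1 h2 h3 h4
    · have hcl : pvClassify l = "google_scholar" := by
        unfold pvClassify; rw [if_pos h1]
      rw [ih]; simp [hcl, List.append_assoc]
    · have hcl : pvClassify l = "linkedin" := by
        unfold pvClassify; rw [if_neg h1, if_pos h2]
      rw [ih]; simp [hcl, List.append_assoc]
    · have hcl : pvClassify l = "youtube" := by
        unfold pvClassify; rw [if_neg h1, if_neg h2, if_pos h3]
      rw [ih]; simp [hcl, List.append_assoc]
    · have hcl : pvClassify l = "personal_website" := by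
        unfold pvClassify; rw [if_neg h1, if_neg h2, if_neg h3, if_pos h4]
      rw [ih]; simp [hcl, List.append_assoc]
    · have hcl : pvClassify l = "other" := by
        unfold pvClassify; rw [if_neg h1, if_neg h2, if_neg h3, if_neg h4]
      rw [ih]; simp [hcl, List.append_assoc]

-- ===== VERDICT (by name: the statement is the Claim_ definition above) =====
theorem categorize_links_spec : Claim_equal_categorize_links := by
  intro links _
  unfold Spec_categorize_links categorize_links categorize_links_alt
  by_cases h : links = []
  · simp [h]
  · simp only [h, if_false]
    simp [loopA_eq, tagged_filter_map, List.map_cons]
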